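-- pv_equiv track=rewrite | github.com/htanaka1234/decide-me-v2 | decide_me/validate.py | _would_create_session_graph_cycle
-- ===== SOURCE A (Python) =====
-- from collections import defaultdict
--
-- def _would_create_session_graph_cycle(
--     linked_edges: list[tuple[str, str, str]],
--     parent_session_id: str,
--     child_session_id: str,
-- ) -> bool:
--     adjacency: dict[str, set[str]] = defaultdict(set)
--     for parent, child, relationship in linked_edges:
--         if relationship == "contradicts":
--             continue
--         adjacency[parent].add(child)
--     stack = [child_session_id]
--     visited: set[str] = set()
--     while stack:
--         current = stack.pop()
--         if current == parent_session_id: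
--             return True
--         if current in visited:
--             continue
--         visited.add(current)
--         stack.extend(sorted(adjacency.get(current, set()), reverse=True))
--     return False
-- ===== SOURCE B (Python) =====
-- def _would_create_session_graph_cycle(
--     linked_edges: list[tuple[str, str, str]],
--     parent_session_id: str,
--     child_session_id: str,
-- ) -> bool:
--     # Saturate the set of sessions reachable from child_session_id, then test parent membership.
--     reached = {child_session_id}
--     for _ in range(len(linked_edges) + 1):
--         for parent, child, relationship in linked_edges:
--             if relationship != "contradicts" and parent in reached:
--                 reached.add(child)
--     return parent_session_id in reached
-- ===== Notes on version B (the rewrite author's own statement) =====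
-- stated objective: alternative
-- what changed: Replaces the explicit DFS (stack + visited set + per-node sorting of successors) by a fixpoint saturation: repeatedly sweep the edge list len(edges)+1 times growing the set of sessions reachable from child_session_id, then test parent membership; no adjacency dict, no stack, no sorting.
import Mathlib
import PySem

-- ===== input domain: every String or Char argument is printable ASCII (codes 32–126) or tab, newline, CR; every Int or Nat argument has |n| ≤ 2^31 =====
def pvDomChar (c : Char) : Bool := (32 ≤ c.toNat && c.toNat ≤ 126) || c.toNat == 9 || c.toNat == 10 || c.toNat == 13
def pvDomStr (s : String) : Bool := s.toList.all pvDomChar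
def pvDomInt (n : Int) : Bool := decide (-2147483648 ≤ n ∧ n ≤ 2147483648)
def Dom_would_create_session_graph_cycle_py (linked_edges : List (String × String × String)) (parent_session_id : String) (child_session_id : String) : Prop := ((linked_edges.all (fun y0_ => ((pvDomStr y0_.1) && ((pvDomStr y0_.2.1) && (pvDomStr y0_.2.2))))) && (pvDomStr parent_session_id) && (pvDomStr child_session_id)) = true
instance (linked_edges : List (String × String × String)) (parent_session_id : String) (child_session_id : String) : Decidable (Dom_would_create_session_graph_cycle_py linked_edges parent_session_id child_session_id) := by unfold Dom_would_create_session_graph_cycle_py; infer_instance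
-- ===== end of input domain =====

-- B replaces A's explicit DFS (adjacency dict + stack + visited set + sorted successors) by a
-- fixpoint saturation of the set of sessions reachable from child_session_id; same result, no speedup claimed.


-- ===== PORT A =====
-- adjacency: dict[str, set[str]] built with defaultdict(set); 'contradicts' edges skipped
def pvAdjA (linked_edges : List (String × String × String)) : PySem.Dict String (PySem.Set String) :=
  linked_edges.foldl
    (fun d e =>
      if e.2.2 == "contradicts" then d
      else d.modify e.1 PySem.Set.empty (fun s => PySem.Set.add s e.2.1))
    PySem.Dict.empty

-- the while loop; the Python stack pops from the END, so the stack is kept reversed here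
-- (head = top); stack.extend(sorted(…, reverse=True)) therefore prepends the reversed sorted list.
-- Fuel recursion: the fuel passed by would_create_session_graph_cycle_py is proved sufficient below.
def pvLoopA (adj : PySem.Dict String (PySem.Set String)) (parent : String) :
    Nat → List String → PySem.Set String → Bool
  | 0, _, _ => false
  | _ + 1, [], _ => false
  | fuel + 1, current :: rest, visited =>
    if current == parent then true
    else if PySem.Set.contains visited current then pvLoopA adj parent fuel rest visited
    else pvLoopA adj parent fuel
      ((PySem.List.sorted (adj.getD current PySem.Set.empty) (fun x => x) true).reverse ++ rest)
      (PySem.Set.add visited current)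

def would_create_session_graph_cycle_py (linked_edges : List (String × String × String)) (parent_session_id : String) (child_session_id : String) : Bool :=
  pvLoopA (pvAdjA linked_edges) parent_session_id
    ((linked_edges.length + 1) * (linked_edges.length + 2) + 1)
    [child_session_id] PySem.Set.empty

-- ===== PORT B =====
-- one sweep of 'for parent, child, relationship in linked_edges: …' over the current reached set
def pvPassB (linked_edges : List (String × String × String)) (reached : PySem.Set String) : PySem.Set String :=
  linked_edges.foldl
    (fun r e =>
      if !(e.2.2 == "contradicts") && PySem.Set.contains r e.1 then PySem.Set.add r e.2.1 else r)
    reached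

-- 'for _ in range(len(linked_edges) + 1): <sweep>'
def pvIterB (linked_edges : List (String × String × String)) : Nat → PySem.Set String → PySem.Set String
  | 0, r => r
  | n + 1, r => pvIterB linked_edges n (pvPassB linked_edges r)

def would_create_session_graph_cycle_py_alt (linked_edges : List (String × String × String)) (parent_session_id : String) (child_session_id : String) : Bool :=
  PySem.Set.contains
    (pvIterB linked_edges (linked_edges.length + 1) (PySem.Set.add PySem.Set.empty child_session_id))
    parent_session_id

-- ===== PRECONDITION & SPEC =====
def Spec_would_create_session_graph_cycle_py (linked_edges : List (String × String × String)) (parent_session_id : String) (child_session_id : String) (out : Bool) : Prop := out = would_create_session_graph_cycle_py_alt linked_edges parent_session_id child_session_id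
instance (linked_edges : List (String × String × String)) (parent_session_id : String) (child_session_id : String) (out : Bool) : Decidable (Spec_would_create_session_graph_cycle_py linked_edges parent_session_id child_session_id out) := by unfold Spec_would_create_session_graph_cycle_py; infer_instance

-- ===== CLAIM (what is proved, stated in full; the proofs are below) =====
def Claim_equal_would_create_session_graph_cycle_py : Prop := ∀ (linked_edges : List (String × String × String)) (parent_session_id : String) (child_session_id : String), Dom_would_create_session_graph_cycle_py linked_edges parent_session_id child_session_id → Spec_would_create_session_graph_cycle_py linked_edges parent_session_id child_session_id (would_create_session_graph_cycle_py linked_edges parent_session_id child_session_id)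

-- ===== LEMMAS AND PROOFS =====

-- one kept (non-'contradicts') edge
def pvEdge (linked_edges : List (String × String × String)) (a b : String) : Prop :=
  ∃ r, (a, b, r) ∈ linked_edges ∧ r ≠ "contradicts"

-- reachability along kept edges: the specification both programs are reduced to
def pvReach (linked_edges : List (String × String × String)) (a b : String) : Prop :=
  Relation.ReflTransGen (pvEdge linked_edges) a b

-- children of kept edges (the only nodes either program can ever add)
def pvKeptChildren (linked_edges : List (String × String × String)) : List String :=
  (linked_edges.filter (fun e => !(e.2.2 == "contradicts"))).map (fun e => e.2.1)

theorem mem_pvKeptChildren {linked_edges : List (String × String × String)} {c : String} :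
    c ∈ pvKeptChildren linked_edges ↔ ∃ a, pvEdge linked_edges a c := by
  simp only [pvKeptChildren, List.mem_map, List.mem_filter, pvEdge, Bool.not_eq_eq_eq_not,
    Bool.not_true, beq_eq_false_iff_ne, ne_eq]
  constructor
  · rintro ⟨e, ⟨he, hr⟩, rfl⟩
    exact ⟨e.1, e.2.2, by simpa using he, hr⟩
  · rintro ⟨a, r, hmem, hr⟩
    exact ⟨(a, c, r), ⟨hmem, hr⟩, rfl⟩

-- A's adjacency dict: membership in adjacency.get(x, set()) is exactly pvEdge x ·
theorem pvAdjA_mem (linked_edges : List (String × String × String)) (x c : String) :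
    c ∈ (pvAdjA linked_edges).getD x PySem.Set.empty ↔ pvEdge linked_edges x c := by
  suffices h : ∀ (l : List (String × String × String)) (d : PySem.Dict String (PySem.Set String)),
      c ∈ (l.foldl (fun d e =>
        if e.2.2 == "contradicts" then d
        else d.modify e.1 PySem.Set.empty (fun s => PySem.Set.add s e.2.1)) d).getD x PySem.Set.empty
      ↔ c ∈ d.getD x PySem.Set.empty ∨ ∃ r, (x, c, r) ∈ l ∧ r ≠ "contradicts" by
    have := h linked_edges PySem.Dict.empty
    simp only [PySem.Dict.getD_empty] at this
    simpa [pvAdjA, pvEdge, PySem.Set.empty] using this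
  intro l
  induction l with
  | nil => simp
  | cons e tl ih =>
    intro d
    simp only [List.foldl_cons]
    by_cases hr : e.2.2 = "contradicts"
    · rw [if_pos (by simpa using hr), ih d]
      constructor
      · rintro (h | ⟨r, hm, hrr⟩)
        · exact Or.inl h
        · exact Or.inr ⟨r, List.mem_cons_of_mem _ hm, hrr⟩
      · rintro (h | ⟨r, hm, hrr⟩)
        · exact Or.inl h
        · rcases List.mem_cons.1 hm with heq | hm'
          · exact absurd (by rw [show r = e.2.2 from by rw [← heq]]; exact hr) hrr
          · exact Or.inr ⟨r, hm', hrr⟩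
    · rw [if_neg (by simpa using hr), ih, PySem.Dict.getD_modify]
      constructor
      · rintro (h | ⟨r, hm, hrr⟩)
        · by_cases hx : x = e.1
          · rw [if_pos hx] at h
            rcases (PySem.Set.mem_add _ _ _).1 h with h' | h'
            · exact Or.inl (hx ▸ h')
            · exact Or.inr ⟨e.2.2, by rw [hx, h']; exact List.mem_cons_self .., hr⟩
          · rw [if_neg hx] at h
            exact Or.inl h
        · exact Or.inr ⟨r, List.mem_cons_of_mem _ hm, hrr⟩
      · rintro (h | ⟨r, hm, hrr⟩)
        · by_cases hx : x = e.1
          · rw [if_pos hx]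
            exact Or.inl ((PySem.Set.mem_add _ _ _).2 (Or.inl (hx ▸ h)))
          · rw [if_neg hx]; exact Or.inl h
        · rcases List.mem_cons.1 hm with heq | hm'
          · have hx1 : x = e.1 := congrArg Prod.fst heq
            have hx2 : c = e.2.1 := congrArg (fun p => p.2.1) heq
            rw [if_pos hx1]
            exact Or.inl ((PySem.Set.mem_add _ _ _).2 (Or.inr hx2))
          · exact Or.inr ⟨r, hm', hrr⟩

-- values stored in A's adjacency dict are Sets (Nodup); needed for the measure bound
theorem pvAdjSetNodup (linked_edges : List (String × String × String)) (x : String) :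
    ((pvAdjA linked_edges).getD x PySem.Set.empty).Nodup := by
  suffices h : ∀ (l : List (String × String × String)) (d : PySem.Dict String (PySem.Set String)),
      (∀ y, (d.getD y PySem.Set.empty).Nodup) →
      ((l.foldl (fun d e =>
        if e.2.2 == "contradicts" then d
        else d.modify e.1 PySem.Set.empty (fun s => PySem.Set.add s e.2.1)) d).getD x PySem.Set.empty).Nodup by
    exact h linked_edges PySem.Dict.empty (fun y => by simp [PySem.Dict.getD_empty, PySem.Set.empty])
  intro l
  induction l with
  | nil => intro d hd; exact hd x
  | cons e tl ih =>
    intro d hd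
    simp only [List.foldl_cons]
    apply ih
    intro y
    by_cases hr : (e.2.2 == "contradicts") = true
    · rw [if_pos hr]; exact hd y
    · rw [if_neg hr, PySem.Dict.getD_modify]
      by_cases hy : y = e.1
      · rw [if_pos hy]; exact PySem.Set.nodup_add _ _ (hd e.1)
      · rw [if_neg hy]; exact hd y

-- ---------- A side: soundness ----------
theorem pvLoopA_sound (linked_edges : List (String × String × String)) (parent child : String) :
    ∀ (fuel : Nat) (stack : List String) (visited : PySem.Set String),
      (∀ x ∈ stack, pvReach linked_edges child x) →
      pvLoopA (pvAdjA linked_edges) parent fuel stack visited = true →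
      pvReach linked_edges child parent := by
  intro fuel
  induction fuel with
  | zero => intro stack visited _ h; simp [pvLoopA] at h
  | succ f ih =>
    intro stack visited hstack hres
    match stack with
    | [] => simp [pvLoopA] at hres
    | current :: rest =>
      rw [pvLoopA] at hres
      by_cases hp : current = parent
      · exact hp ▸ hstack current (List.mem_cons_self ..)
      · rw [if_neg (by simpa using hp)] at hres
        by_cases hv : PySem.Set.contains visited current = true
        · rw [if_pos hv] at hres
          exact ih rest visited (fun x hx => hstack x (List.mem_cons_of_mem _ hx)) hres
        · rw [if_neg hv] at hres
          refine ih _ _ ?_ hres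
          intro x hx
          rcases List.mem_append.1 hx with hx | hx
          · have hxm : x ∈ (pvAdjA linked_edges).getD current PySem.Set.empty :=
              (PySem.List.mem_sorted _ _ _ _).1 (List.mem_reverse.1 hx)
            exact Relation.ReflTransGen.tail (hstack current (List.mem_cons_self ..))
              ((pvAdjA_mem linked_edges current x).1 hxm)
          · exact hstack x (List.mem_cons_of_mem _ hx)

-- every node reachable from child stays inside a child-containing edge-closed set
theorem pv_reach_mem (linked_edges : List (String × String × String))
    (V : List String) (child : String)
    (hchild : child ∈ V)
    (hclosed : ∀ v ∈ V, ∀ c, pvEdge linked_edges v c → c ∈ V) :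
    ∀ x, pvReach linked_edges child x → x ∈ V := by
  intro x hx
  induction hx with
  | refl => exact hchild
  | tail _ he ih => exact hclosed _ ih _ he

-- the universe of nodes either program touches, and A's loop measure
def pvU (linked_edges : List (String × String × String)) (child : String) : Finset String :=
  insert child (pvKeptChildren linked_edges).toFinset

def pvM (linked_edges : List (String × String × String)) (child : String)
    (visited : PySem.Set String) (stack : List String) : Nat :=
  ((pvU linked_edges child) \ visited.toFinset).card * (linked_edges.length + 1) + stack.length

-- ---------- A side: completeness (returns false only when parent is unreachable) ----------
theorem pvLoopA_complete (linked_edges : List (String × String × String)) (parent child : String) :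
    ∀ (fuel : Nat) (stack : List String) (visited : PySem.Set String),
      (∀ x ∈ stack, x ∈ pvU linked_edges child) →
      parent ∉ visited →
      (child ∈ visited ∨ child ∈ stack) →
      (∀ v ∈ visited, ∀ c, pvEdge linked_edges v c → c ∈ visited ∨ c ∈ stack) →
      pvM linked_edges child visited stack ≤ fuel →
      pvLoopA (pvAdjA linked_edges) parent fuel stack visited = false →
      ¬ pvReach linked_edges child parent := by
  intro fuel
  induction fuel with
  | zero =>
    intro stack visited _ hparent hchild hclosed hM _
    have hstack : stack = [] := by
      cases stack with
      | nil => rfl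
      | cons a t => exfalso; unfold pvM at hM; simp at hM
    subst hstack
    intro hr
    apply hparent
    refine pv_reach_mem linked_edges visited child ?_ ?_ parent hr
    · rcases hchild with h | h
      · exact h
      · simp at h
    · intro v hv c hc
      rcases hclosed v hv c hc with h | h
      · exact h
      · simp at h
  | succ f ih =>
    intro stack visited hU hparent hchild hclosed hM hres
    match stack with
    | [] =>
      intro hr
      apply hparent
      refine pv_reach_mem linked_edges visited child ?_ ?_ parent hr
      · rcases hchild with h | h
        · exact h
        · simp at h
      · intro v hv c hc
        rcases hclosed v hv c hc with h | h
        · exact h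
        · simp at h
    | current :: rest =>
      rw [pvLoopA] at hres
      by_cases hp : current = parent
      · rw [if_pos (by simpa using hp)] at hres; simp at hres
      · rw [if_neg (by simpa using hp)] at hres
        by_cases hv : PySem.Set.contains visited current = true
        · -- current already visited: drop it
          rw [if_pos hv] at hres
          have hcur : current ∈ visited := (PySem.Set.contains_iff _ _).1 hv
          refine ih rest visited (fun x hx => hU x (List.mem_cons_of_mem _ hx)) hparent ?_ ?_ ?_ hres
          · rcases hchild with h | h
            · exact Or.inl h
            · rcases List.mem_cons.1 h with rfl | h'
              · exact Or.inl hcur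
              · exact Or.inr h'
          · intro v hvv c hc
            rcases hclosed v hvv c hc with h | h
            · exact Or.inl h
            · rcases List.mem_cons.1 h with rfl | h'
              · exact Or.inl hcur
              · exact Or.inr h'
          · unfold pvM at hM ⊢
            simp only [List.length_cons] at hM
            omega
        · -- new node: mark visited, push its children
          rw [if_neg hv] at hres
          have hcur : current ∉ visited := fun hmem => hv ((PySem.Set.contains_iff _ _).2 hmem)
          set pushed := (PySem.List.sorted ((pvAdjA linked_edges).getD current PySem.Set.empty) (fun x => x) true).reverse with hpushed
          have hpmem : ∀ y, y ∈ pushed ↔ pvEdge linked_edges current y := by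
            intro y
            rw [hpushed, List.mem_reverse, PySem.List.mem_sorted _ _ _ _, pvAdjA_mem]
          have hmemadd : ∀ y : String, y ∈ PySem.Set.add visited current ↔ y ∈ visited ∨ y = current :=
            fun y => PySem.Set.mem_add _ _ _
          refine ih (pushed ++ rest) (PySem.Set.add visited current) ?_ ?_ ?_ ?_ ?_ hres
          · intro x hx
            rcases List.mem_append.1 hx with hx | hx
            · exact Finset.mem_insert.2 (Or.inr (List.mem_toFinset.2
                (mem_pvKeptChildren.2 ⟨current, (hpmem x).1 hx⟩)))
            · exact hU x (List.mem_cons_of_mem _ hx)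
          · intro hmem
            rcases (hmemadd parent).1 hmem with h | h
            · exact hparent h
            · exact hp h.symm
          · rcases hchild with h | h
            · exact Or.inl ((hmemadd child).2 (Or.inl h))
            · rcases List.mem_cons.1 h with rfl | h'
              · exact Or.inl ((hmemadd child).2 (Or.inr rfl))
              · exact Or.inr (List.mem_append.2 (Or.inr h'))
          · intro v hvv c hc
            rcases (hmemadd v).1 hvv with h | rfl
            · rcases hclosed v h c hc with h' | h'
              · exact Or.inl ((hmemadd c).2 (Or.inl h'))
              · rcases List.mem_cons.1 h' with rfl | h''
                · exact Or.inl ((hmemadd c).2 (Or.inr rfl))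
                · exact Or.inr (List.mem_append.2 (Or.inr h''))
            · exact Or.inr (List.mem_append.2 (Or.inl ((hpmem c).2 hc)))
          · -- the measure drops by at least 2
            have hUc : current ∈ pvU linked_edges child := hU current (List.mem_cons_self ..)
            have hvis' : (PySem.Set.add visited current) = visited ++ [current] :=
              PySem.Set.add_of_not_mem hcur
            have hfin' : (PySem.Set.add visited current).toFinset = insert current visited.toFinset := by
              rw [hvis']; simp [List.toFinset_append]
            have hcard : ((pvU linked_edges child) \ (PySem.Set.add visited current).toFinset).card
                < ((pvU linked_edges child) \ visited.toFinset).card := by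
              apply Finset.card_lt_card
              rw [hfin']
              constructor
              · intro x hx
                rcases Finset.mem_sdiff.1 hx with ⟨h1, h2⟩
                exact Finset.mem_sdiff.2 ⟨h1, fun hm => h2 (Finset.mem_insert.2 (Or.inr hm))⟩
              · intro hsub
                have hmm : current ∈ (pvU linked_edges child) \ visited.toFinset :=
                  Finset.mem_sdiff.2 ⟨hUc, fun hm => hcur (List.mem_toFinset.1 hm)⟩
                rcases Finset.mem_sdiff.1 (hsub hmm) with ⟨_, h2⟩
                exact h2 (Finset.mem_insert.2 (Or.inl rfl))
            have hplen : pushed.length ≤ linked_edges.length := by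
              have hnd : pushed.Nodup :=
                List.nodup_reverse.2
                  ((PySem.List.sorted_perm _ _ _).nodup_iff.2 (pvAdjSetNodup linked_edges current))
              calc pushed.length = pushed.toFinset.card := (List.toFinset_card_of_nodup hnd).symm
                _ ≤ (pvKeptChildren linked_edges).toFinset.card := by
                    apply Finset.card_le_card
                    intro x hx
                    exact List.mem_toFinset.2
                      (mem_pvKeptChildren.2 ⟨current, (hpmem x).1 (List.mem_toFinset.1 hx)⟩)
                _ ≤ (pvKeptChildren linked_edges).length := List.toFinset_card_le _
                _ ≤ linked_edges.length := by
                    unfold pvKeptChildren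
                    rw [List.length_map]
                    exact List.length_filter_le _ _
            unfold pvM at hM ⊢
            set k := ((pvU linked_edges child) \ visited.toFinset).card with hk
            set k' := ((pvU linked_edges child) \ (PySem.Set.add visited current).toFinset).card with hk'
            have hkk : k' + 1 ≤ k := hcard
            have hmul : k' * (linked_edges.length + 1) + (linked_edges.length + 1)
                ≤ k * (linked_edges.length + 1) := by
              calc k' * (linked_edges.length + 1) + (linked_edges.length + 1)
                  = (k' + 1) * (linked_edges.length + 1) := by ring
                _ ≤ k * (linked_edges.length + 1) := Nat.mul_le_mul_right _ hkk
            simp only [List.length_append, List.length_cons] at hM ⊢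
            omega

-- A = true exactly on reachability
theorem pvA_iff (linked_edges : List (String × String × String)) (parent child : String) :
    would_create_session_graph_cycle_py linked_edges parent child = true
      ↔ pvReach linked_edges child parent := by
  constructor
  · intro h
    exact pvLoopA_sound linked_edges parent child _ _ _
      (by intro x hx; rcases List.mem_singleton.1 hx with rfl; exact Relation.ReflTransGen.refl) h
  · intro h
    by_contra hfalse
    have hres : would_create_session_graph_cycle_py linked_edges parent child = false := by
      cases hres : would_create_session_graph_cycle_py linked_edges parent child
      · rfl
      · exact absurd hres hfalse
    refine pvLoopA_complete linked_edges parent child _ [child] PySem.Set.empty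
      ?_ (by simp [PySem.Set.empty]) (Or.inr (List.mem_singleton.2 rfl))
      (by intro v hv; simp [PySem.Set.empty] at hv) ?_ hres h
    · intro x hx
      rcases List.mem_singleton.1 hx with rfl
      exact Finset.mem_insert_self _ _
    · -- fuel is sufficient at the initial state
      unfold pvM
      have hcard : (pvU linked_edges child).card ≤ linked_edges.length + 1 := by
        calc (pvU linked_edges child).card
            ≤ (pvKeptChildren linked_edges).toFinset.card + 1 := Finset.card_insert_le _ _
          _ ≤ (pvKeptChildren linked_edges).length + 1 :=
              Nat.add_le_add_right (List.toFinset_card_le _) 1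
          _ ≤ linked_edges.length + 1 := by
              apply Nat.add_le_add_right
              unfold pvKeptChildren
              rw [List.length_map]
              exact List.length_filter_le _ _
      have hsd : ((pvU linked_edges child) \ (PySem.Set.empty : PySem.Set String).toFinset).card
          ≤ linked_edges.length + 1 := by
        refine le_trans (Finset.card_le_card (Finset.sdiff_subset)) hcard
      have hmul : ((pvU linked_edges child) \ (PySem.Set.empty : PySem.Set String).toFinset).card
            * (linked_edges.length + 1)
          ≤ (linked_edges.length + 1) * (linked_edges.length + 1) :=
        Nat.mul_le_mul_right _ hsd
      have : (linked_edges.length + 1) * (linked_edges.length + 1) + 1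
          ≤ (linked_edges.length + 1) * (linked_edges.length + 2) + 1 := by
        apply Nat.add_le_add_right
        exact Nat.mul_le_mul_left _ (by omega)
      simp only [List.length_cons, List.length_nil]
      omega

-- ---------- B side ----------

-- one sweep only appends
theorem pvPassB_append :
    ∀ (l : List (String × String × String)) (r : PySem.Set String),
      ∃ t, l.foldl (fun r e =>
        if !(e.2.2 == "contradicts") && PySem.Set.contains r e.1 then PySem.Set.add r e.2.1 else r) r
        = r ++ t := by
  intro l
  induction l with
  | nil => intro r; exact ⟨[], by simp⟩
  | cons e tl ih =>
    intro r
    simp only [List.foldl_cons]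
    by_cases hc : (!(e.2.2 == "contradicts") && PySem.Set.contains r e.1) = true
    · rw [if_pos hc]
      by_cases hm : e.2.1 ∈ r
      · rw [PySem.Set.add_of_mem hm]; exact ih r
      · rw [PySem.Set.add_of_not_mem hm]
        rcases ih (r ++ [e.2.1]) with ⟨t, ht⟩
        exact ⟨[e.2.1] ++ t, by rw [ht, List.append_assoc]⟩
    · rw [if_neg hc]; exact ih r

theorem pvPassB_prefix (linked_edges : List (String × String × String)) (r : PySem.Set String) :
    ∃ t, pvPassB linked_edges r = r ++ t :=
  pvPassB_append linked_edges r

-- a sweep preserves distinctness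
theorem pvPassB_nodup :
    ∀ (l : List (String × String × String)) (r : PySem.Set String), r.Nodup →
      (l.foldl (fun r e =>
        if !(e.2.2 == "contradicts") && PySem.Set.contains r e.1 then PySem.Set.add r e.2.1 else r) r).Nodup := by
  intro l
  induction l with
  | nil => intro r h; exact h
  | cons e tl ih =>
    intro r h
    simp only [List.foldl_cons]
    by_cases hc : (!(e.2.2 == "contradicts") && PySem.Set.contains r e.1) = true
    · rw [if_pos hc]; exact ih _ (PySem.Set.nodup_add _ _ h)
    · rw [if_neg hc]; exact ih _ h

-- everything a sweep adds is a kept child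
theorem pvPassB_mem_bound :
    ∀ (l : List (String × String × String)) (r : PySem.Set String) (x : String),
      x ∈ l.foldl (fun r e =>
        if !(e.2.2 == "contradicts") && PySem.Set.contains r e.1 then PySem.Set.add r e.2.1 else r) r →
      x ∈ r ∨ ∃ e ∈ l, x = e.2.1 ∧ e.2.2 ≠ "contradicts" := by
  intro l
  induction l with
  | nil => intro r x hx; exact Or.inl hx
  | cons e tl ih =>
    intro r x hx
    simp only [List.foldl_cons] at hx
    by_cases hc : (!(e.2.2 == "contradicts") && PySem.Set.contains r e.1) = true
    · rw [if_pos hc] at hx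
      rcases ih _ _ hx with h | ⟨e', he', hx', hr'⟩
      · rcases (PySem.Set.mem_add _ _ _).1 h with h' | h'
        · exact Or.inl h'
        · refine Or.inr ⟨e, List.mem_cons_self .., h', ?_⟩
          rw [Bool.and_eq_true] at hc
          simpa using hc.1
      · exact Or.inr ⟨e', List.mem_cons_of_mem _ he', hx', hr'⟩
    · rw [if_neg hc] at hx
      rcases ih _ _ hx with h | ⟨e', he', hx', hr'⟩
      · exact Or.inl h
      · exact Or.inr ⟨e', List.mem_cons_of_mem _ he', hx', hr'⟩

-- everything a sweep adds is reachable from child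
theorem pvPassB_sound (linked_edges : List (String × String × String)) (child : String) :
    ∀ (l : List (String × String × String)) (r : PySem.Set String),
      (∀ e ∈ l, e ∈ linked_edges) →
      (∀ y ∈ r, pvReach linked_edges child y) →
      ∀ x ∈ l.foldl (fun r e =>
        if !(e.2.2 == "contradicts") && PySem.Set.contains r e.1 then PySem.Set.add r e.2.1 else r) r,
        pvReach linked_edges child x := by
  intro l
  induction l with
  | nil => intro r _ hr x hx; exact hr x hx
  | cons e tl ih =>
    intro r hsub hr x hx
    simp only [List.foldl_cons] at hx
    by_cases hc : (!(e.2.2 == "contradicts") && PySem.Set.contains r e.1) = true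
    · rw [if_pos hc] at hx
      rw [Bool.and_eq_true] at hc
      rcases hc with ⟨hrel, hcont⟩
      refine ih _ (fun e' he' => hsub e' (List.mem_cons_of_mem _ he')) ?_ x hx
      intro y hy
      rcases (PySem.Set.mem_add _ _ _).1 hy with h' | h'
      · exact hr y h'
      · subst h'
        refine Relation.ReflTransGen.tail (hr e.1 ((PySem.Set.contains_iff _ _).1 hcont)) ?_
        exact ⟨e.2.2, by simpa using hsub e (List.mem_cons_self ..), by simpa using hrel⟩
    · rw [if_neg hc] at hx
      exact ih _ (fun e' he' => hsub e' (List.mem_cons_of_mem _ he')) hr x hx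

-- a fixed sweep means the set is closed under every kept edge of the swept list
theorem pvPassB_fixed_closed :
    ∀ (l : List (String × String × String)) (r : PySem.Set String),
      l.foldl (fun r e =>
        if !(e.2.2 == "contradicts") && PySem.Set.contains r e.1 then PySem.Set.add r e.2.1 else r) r = r →
      ∀ e ∈ l, e.2.2 ≠ "contradicts" → e.1 ∈ r → e.2.1 ∈ r := by
  intro l
  induction l with
  | nil => intro r _ e he; simp at he
  | cons e tl ih =>
    intro r hfix e' he' hrel hin
    simp only [List.foldl_cons] at hfix
    -- the head step is itself the identity: lengths force it
    have hstep : (if !(e.2.2 == "contradicts") && PySem.Set.contains r e.1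
        then PySem.Set.add r e.2.1 else r) = r := by
      rcases pvPassB_append tl
        (if !(e.2.2 == "contradicts") && PySem.Set.contains r e.1
          then PySem.Set.add r e.2.1 else r) with ⟨t, ht⟩
      rw [ht] at hfix
      by_cases hc : (!(e.2.2 == "contradicts") && PySem.Set.contains r e.1) = true
      · rw [if_pos hc] at hfix ⊢
        by_cases hm : e.2.1 ∈ r
        · rw [PySem.Set.add_of_mem hm]
        · exfalso
          rw [PySem.Set.add_of_not_mem hm] at hfix
          have := congrArg List.length hfix
          simp at this
      · rw [if_neg hc] at hfix ⊢
    have htl : tl.foldl (fun r e =>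
        if !(e.2.2 == "contradicts") && PySem.Set.contains r e.1 then PySem.Set.add r e.2.1 else r) r = r := by
      rw [hstep] at hfix; exact hfix
    rcases List.mem_cons.1 he' with rfl | hm'
    · -- head edge: its step was the identity
      have hc : (!(e'.2.2 == "contradicts") && PySem.Set.contains r e'.1) = true := by
        simp [hrel, hin]
      rw [if_pos hc] at hstep
      by_cases hm : e'.2.1 ∈ r
      · exact hm
      · exfalso
        rw [PySem.Set.add_of_not_mem hm] at hstep
        have := congrArg List.length hstep
        simp at this
    · exact ih r htl e' hm' hrel hin

-- iteration: unfolding from the right, additivity, prefix growth, persistence of a fixpoint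
theorem pvIterB_add (linked_edges : List (String × String × String)) :
    ∀ (a b : Nat) (r : PySem.Set String),
      pvIterB linked_edges (a + b) r = pvIterB linked_edges b (pvIterB linked_edges a r) := by
  intro a
  induction a with
  | zero => intro b r; simp [pvIterB]
  | succ n ih =>
    intro b r
    have h1 : n + 1 + b = (n + b) + 1 := by omega
    rw [h1]
    show pvIterB linked_edges (n + b) (pvPassB linked_edges r)
      = pvIterB linked_edges b (pvIterB linked_edges n (pvPassB linked_edges r))
    exact ih b (pvPassB linked_edges r)

theorem pvIterB_prefix (linked_edges : List (String × String × String)) :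
    ∀ (n : Nat) (r : PySem.Set String), ∃ t, pvIterB linked_edges n r = r ++ t := by
  intro n
  induction n with
  | zero => intro r; exact ⟨[], by simp [pvIterB]⟩
  | succ m ih =>
    intro r
    rcases pvPassB_prefix linked_edges r with ⟨t0, ht0⟩
    rcases ih (pvPassB linked_edges r) with ⟨t1, ht1⟩
    refine ⟨t0 ++ t1, ?_⟩
    show pvIterB linked_edges m (pvPassB linked_edges r) = r ++ (t0 ++ t1)
    rw [ht1, ht0, List.append_assoc]

theorem pvIterB_fixed (linked_edges : List (String × String × String)) :
    ∀ (n : Nat) (r : PySem.Set String), pvPassB linked_edges r = r →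
      pvIterB linked_edges n r = r := by
  intro n
  induction n with
  | zero => intro r _; rfl
  | succ m ih =>
    intro r hfix
    show pvIterB linked_edges m (pvPassB linked_edges r) = r
    rw [hfix]; exact ih r hfix

-- strictly growing until a sweep fixes the set
theorem pvIterB_grow (linked_edges : List (String × String × String)) (r0 : PySem.Set String)
    (h0 : r0.length = 1) :
    ∀ n : Nat, (∀ k < n, pvPassB linked_edges (pvIterB linked_edges k r0) ≠ pvIterB linked_edges k r0) →
      n + 1 ≤ (pvIterB linked_edges n r0).length := by
  intro n
  induction n with
  | zero => intro _; simp [pvIterB, h0]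
  | succ m ih =>
    intro h
    have hm : m + 1 ≤ (pvIterB linked_edges m r0).length :=
      ih (fun k hk => h k (by omega))
    have hstep : pvIterB linked_edges (m + 1) r0
        = pvPassB linked_edges (pvIterB linked_edges m r0) := by
      have := pvIterB_add linked_edges m 1 r0
      rw [show m + 1 = m + 1 from rfl] at this
      rw [this]
      rfl
    rcases pvPassB_prefix linked_edges (pvIterB linked_edges m r0) with ⟨t, ht⟩
    have hne : t ≠ [] := by
      intro hnil
      apply h m (by omega)
      rw [ht, hnil, List.append_nil]
    have : 1 ≤ t.length := by
      cases t with
      | nil => exact absurd rfl hne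
      | cons a s => simp
    rw [hstep, ht, List.length_append]
    omega

theorem pvIterB_nodup (linked_edges : List (String × String × String)) :
    ∀ (n : Nat) (r : PySem.Set String), r.Nodup → (pvIterB linked_edges n r).Nodup := by
  intro n
  induction n with
  | zero => intro r h; exact h
  | succ m ih =>
    intro r h
    exact ih (pvPassB linked_edges r) (pvPassB_nodup linked_edges r h)

theorem pvIterB_mem_bound (linked_edges : List (String × String × String)) :
    ∀ (n : Nat) (r : PySem.Set String) (x : String),
      x ∈ pvIterB linked_edges n r → x ∈ r ∨ x ∈ pvKeptChildren linked_edges := by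
  intro n
  induction n with
  | zero => intro r x hx; exact Or.inl hx
  | succ m ih =>
    intro r x hx
    rcases ih (pvPassB linked_edges r) x hx with h | h
    · rcases pvPassB_mem_bound linked_edges r x h with h' | ⟨e, he, rfl, hr⟩
      · exact Or.inl h'
      · exact Or.inr (mem_pvKeptChildren.2 ⟨e.1, e.2.2, by simpa using he, hr⟩)
    · exact Or.inr h

theorem pvIterB_sound (linked_edges : List (String × String × String)) (child : String) :
    ∀ (n : Nat) (r : PySem.Set String),
      (∀ y ∈ r, pvReach linked_edges child y) →
      ∀ x ∈ pvIterB linked_edges n r, pvReach linked_edges child x := by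
  intro n
  induction n with
  | zero => intro r hr x hx; exact hr x hx
  | succ m ih =>
    intro r hr x hx
    exact ih (pvPassB linked_edges r)
      (pvPassB_sound linked_edges child linked_edges r (fun e he => he) hr) x hx

-- the saturated set: contains child, distinct, within the universe, closed, exactly the reachable set
theorem pvB_iff (linked_edges : List (String × String × String)) (parent child : String) :
    would_create_session_graph_cycle_py_alt linked_edges parent child = true
      ↔ pvReach linked_edges child parent := by
  have hr0 : (PySem.Set.add PySem.Set.empty child) = [child] := rfl
  -- some sweep within the first len+1 fixes the set
  have hfixex : ∃ k, k ≤ linked_edges.length ∧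
      pvPassB linked_edges (pvIterB linked_edges k (PySem.Set.add PySem.Set.empty child))
        = pvIterB linked_edges k (PySem.Set.add PySem.Set.empty child) := by
    by_contra hno
    push Not at hno
    have hgrow := pvIterB_grow linked_edges (PySem.Set.add PySem.Set.empty child)
      (by rw [hr0]; rfl) (linked_edges.length + 1)
      (fun k hk => hno k (by omega))
    have hbound : (pvIterB linked_edges (linked_edges.length + 1)
        (PySem.Set.add PySem.Set.empty child)).length ≤ linked_edges.length + 1 := by
      set F := pvIterB linked_edges (linked_edges.length + 1) (PySem.Set.add PySem.Set.empty child) with hF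
      have hnd : F.Nodup := pvIterB_nodup linked_edges _ _ (by rw [hr0]; simp)
      have hsub : ∀ x ∈ F, x ∈ child :: pvKeptChildren linked_edges := by
        intro x hx
        rcases pvIterB_mem_bound linked_edges _ _ x hx with h | h
        · rw [hr0] at h
          rcases List.mem_singleton.1 h with rfl
          exact List.mem_cons_self ..
        · exact List.mem_cons_of_mem _ h
      calc F.length = F.toFinset.card := (List.toFinset_card_of_nodup hnd).symm
        _ ≤ (child :: pvKeptChildren linked_edges).toFinset.card := by
            apply Finset.card_le_card
            intro x hx
            exact List.mem_toFinset.2 (hsub x (List.mem_toFinset.1 hx))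
        _ ≤ (child :: pvKeptChildren linked_edges).length := List.toFinset_card_le _
        _ ≤ linked_edges.length + 1 := by
            simp only [List.length_cons]
            apply Nat.add_le_add_right
            unfold pvKeptChildren
            rw [List.length_map]
            exact List.length_filter_le _ _
    omega
  rcases hfixex with ⟨k, hk, hfix⟩
  -- the final set is that fixpoint
  have hFeq : pvIterB linked_edges (linked_edges.length + 1) (PySem.Set.add PySem.Set.empty child)
      = pvIterB linked_edges k (PySem.Set.add PySem.Set.empty child) := by
    have hsplit : linked_edges.length + 1 = k + (linked_edges.length + 1 - k) := by omega
    rw [hsplit, pvIterB_add]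
    exact pvIterB_fixed linked_edges _ _ hfix
  set F := pvIterB linked_edges (linked_edges.length + 1) (PySem.Set.add PySem.Set.empty child) with hF
  have hchildF : child ∈ F := by
    rcases pvIterB_prefix linked_edges (linked_edges.length + 1) (PySem.Set.add PySem.Set.empty child)
      with ⟨t, ht⟩
    rw [← hF] at ht
    rw [ht, hr0]
    exact List.mem_append.2 (Or.inl (List.mem_singleton.2 rfl))
  have hclosedF : ∀ v ∈ F, ∀ c, pvEdge linked_edges v c → c ∈ F := by
    intro v hv c hc
    rcases hc with ⟨r, hmem, hr⟩
    rw [hFeq] at hv ⊢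
    exact pvPassB_fixed_closed linked_edges _ hfix (v, c, r) hmem hr hv
  constructor
  · intro h
    have hmem : parent ∈ F := (PySem.Set.contains_iff _ _).1 h
    refine pvIterB_sound linked_edges child _ _ ?_ parent hmem
    intro y hy
    rw [hr0] at hy
    rcases List.mem_singleton.1 hy with rfl
    exact Relation.ReflTransGen.refl
  · intro h
    exact (PySem.Set.contains_iff _ _).2 (pv_reach_mem linked_edges F child hchildF hclosedF parent h)

-- ===== VERDICT (by name: the statement is the Claim_ definition above) =====
theorem would_create_session_graph_cycle_py_spec : Claim_equal_would_create_session_graph_cycle_py := by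
  intro linked_edges parent child _
  unfold Spec_would_create_session_graph_cycle_py
  have hA := pvA_iff linked_edges parent child
  have hB := pvB_iff linked_edges parent child
  cases hres : would_create_session_graph_cycle_py linked_edges parent child
  · cases hres' : would_create_session_graph_cycle_py_alt linked_edges parent child
    · rfl
    · exact absurd (hA.2 (hB.1 hres')) (by simp [hres])
  · exact (hB.2 (hA.1 hres)).symm
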